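-- pv_equiv track=rewrite | github.com/leobeuque/Projet-d-ordonnancement | Algorithme métaheuristique tabou ordonnancement version finale.py | f
-- ===== SOURCE A (Python) =====
-- def f(s):  #Calcule le nombre de cases vides (1 case vide = 1 unité de durée d'inactivité d'une compétence) qui ne sont pas situées à une extremité droite
--     SommeCasesVides = 0
--     for k in range(len(s)):
--         sommePotentielle = 0
--         for l in range (len(s[k])):
--             if s[k][l] != (-1,-1):
--                 SommeCasesVides += sommePotentielle
--                 sommePotentielle = 0
--             else:
--                 sommePotentielle += 1
--     return SommeCasesVides
-- ===== SOURCE B (Python) =====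
-- def _empties_before_last(row):
--     # strip trailing empty cells, then count the empty cells that remain
--     r = list(row)
--     while r and r[-1] == (-1, -1):
--         r.pop()
--     return r.count((-1, -1))
--
-- def f(s):
--     return sum(_empties_before_last(row) for row in s)
-- ===== Notes on version B (the rewrite author's own statement) =====
-- stated objective: simpler
-- what changed: Replaces A's pending-counter state machine (flush a running tally at each non-empty cell) by a per-row decomposition: strip trailing empty cells, then count the empty cells that remain, and sum over rows.
import Mathlib
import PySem

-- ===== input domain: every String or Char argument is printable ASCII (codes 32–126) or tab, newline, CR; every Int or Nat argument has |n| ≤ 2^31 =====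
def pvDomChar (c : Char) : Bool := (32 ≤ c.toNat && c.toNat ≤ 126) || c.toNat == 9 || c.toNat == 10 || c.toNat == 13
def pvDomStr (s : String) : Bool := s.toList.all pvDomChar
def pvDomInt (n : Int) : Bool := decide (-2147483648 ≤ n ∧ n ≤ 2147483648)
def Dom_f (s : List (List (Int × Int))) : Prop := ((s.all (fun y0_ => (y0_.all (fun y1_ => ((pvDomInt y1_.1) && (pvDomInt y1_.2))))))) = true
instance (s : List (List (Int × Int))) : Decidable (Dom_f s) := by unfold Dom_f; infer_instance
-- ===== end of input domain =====

-- ===== PORT A =====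
-- A keeps a pending counter of empties, flushed into the total at each non-empty cell.
def fInner (st : Int × Int) (c : Int × Int) : Int × Int :=
  if c ≠ ((-1 : Int), (-1 : Int)) then (st.1 + st.2, 0) else (st.1, st.2 + 1)

def f (s : List (List (Int × Int))) : Int :=
  s.foldl (fun acc row => (row.foldl fInner (acc, 0)).1) 0

-- ===== PORT B =====
-- B strips trailing empty cells from a row (the pop-while loop = dropWhile on the reverse),
-- then counts the empty cells that remain; the total is the sum over rows.
def trimRow (row : List (Int × Int)) : List (Int × Int) :=
  (row.reverse.dropWhile (fun c => c = ((-1 : Int), (-1 : Int)))).reverse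

def emptiesBeforeLast (row : List (Int × Int)) : Int :=
  ((trimRow row).count ((-1 : Int), (-1 : Int)) : Int)

def f_alt (s : List (List (Int × Int))) : Int :=
  s.foldl (fun t row => t + emptiesBeforeLast row) 0

-- ===== PRECONDITION & SPEC =====
def Spec_f (s : List (List (Int × Int))) (out : Int) : Prop := out = f_alt s
instance (s : List (List (Int × Int))) (out : Int) : Decidable (Spec_f s out) := by unfold Spec_f; infer_instance

-- ===== CLAIM (what is proved, stated in full; the proofs are below) =====
def Claim_equal_f : Prop := ∀ (s : List (List (Int × Int))), Dom_f s → Spec_f s (f s)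

-- ===== LEMMAS AND PROOFS =====

theorem trim_cons_of_any (c : Int × Int) (row : List (Int × Int))
    (h : row.any (fun x => x ≠ ((-1 : Int), (-1 : Int)))) :
    trimRow (c :: row) = c :: trimRow row := by
  unfold trimRow
  have hne : (row.reverse.dropWhile (fun c => c = ((-1 : Int), (-1 : Int)))) ≠ [] := by
    intro hnil
    rw [List.dropWhile_eq_nil_iff] at hnil
    rcases List.any_eq_true.mp h with ⟨x, hx, hxne⟩
    have := hnil x (List.mem_reverse.mpr hx)
    simp_all
  have hne' : (row.reverse.dropWhile (fun c => c = ((-1 : Int), (-1 : Int)))).isEmpty = false := by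
    simpa [List.isEmpty_iff] using hne
  rw [List.reverse_cons, List.dropWhile_append, hne']
  simp

theorem trim_all_empty (row : List (Int × Int))
    (h : ¬ row.any (fun x => x ≠ ((-1 : Int), (-1 : Int))) = true) :
    trimRow row = [] := by
  unfold trimRow
  have : row.reverse.dropWhile (fun c => c = ((-1 : Int), (-1 : Int))) = [] := by
    rw [List.dropWhile_eq_nil_iff]
    intro x hx
    simp only [List.any_eq_true, not_exists, not_and] at h
    have := h x (List.mem_reverse.mp hx)
    simpa using this
  simp [this]

theorem trim_cons_all_empty (c : Int × Int) (rest : List (Int × Int))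
    (hc : c ≠ ((-1 : Int), (-1 : Int)))
    (hrest : ¬ rest.any (fun x => x ≠ ((-1 : Int), (-1 : Int))) = true) :
    trimRow (c :: rest) = [c] := by
  have h0 : rest.reverse.dropWhile (fun c => c = ((-1 : Int), (-1 : Int))) = [] := by
    have := trim_all_empty rest hrest
    unfold trimRow at this
    simpa using this
  unfold trimRow
  rw [List.reverse_cons, List.dropWhile_append, h0]
  simp [hc]

theorem inner_eq (row : List (Int × Int)) : ∀ (a p : Int),
    (row.foldl fInner (a, p)).1 =
      a + (if row.any (fun x => x ≠ ((-1 : Int), (-1 : Int))) then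
            p + ((trimRow row).count ((-1 : Int), (-1 : Int)) : Int) else 0) := by
  induction row with
  | nil => intro a p; simp
  | cons c rest ih =>
    intro a p
    rw [List.foldl_cons]
    by_cases hc : c = ((-1 : Int), (-1 : Int))
    · subst hc
      have step : fInner (a, p) ((-1 : Int), (-1 : Int)) = (a, p + 1) := by
        simp [fInner]
      rw [step, ih]
      by_cases hrest : rest.any (fun x => x ≠ ((-1 : Int), (-1 : Int))) = true
      · have hcond : (((-1 : Int), (-1 : Int)) :: rest).any
            (fun x => x ≠ ((-1 : Int), (-1 : Int))) = true := by
          simp only [List.any_cons, hrest, Bool.or_true]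
        rw [if_pos hrest, if_pos hcond, trim_cons_of_any _ _ hrest]
        simp
        ring
      · have hcond : ¬ (((-1 : Int), (-1 : Int)) :: rest).any
            (fun x => x ≠ ((-1 : Int), (-1 : Int))) = true := by
          simpa using hrest
        rw [if_neg hrest, if_neg hcond]
    · have step : fInner (a, p) c = (a + p, 0) := by
        simp [fInner, hc]
      rw [step, ih]
      have hany : (c :: rest).any (fun x => x ≠ ((-1 : Int), (-1 : Int))) = true := by
        simp [hc]
      by_cases hrest : rest.any (fun x => x ≠ ((-1 : Int), (-1 : Int))) = true
      · rw [if_pos hrest, if_pos hany, trim_cons_of_any _ _ hrest]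
        simp [hc]
        ring
      · rw [if_neg hrest, if_pos hany, trim_cons_all_empty c rest hc hrest]
        simp [hc]

theorem row_contrib (row : List (Int × Int)) (a : Int) :
    (row.foldl fInner (a, 0)).1 = a + emptiesBeforeLast row := by
  rw [inner_eq]
  by_cases h : row.any (fun x => x ≠ ((-1 : Int), (-1 : Int))) = true
  · rw [if_pos h]; simp [emptiesBeforeLast]
  · rw [if_neg h]; simp [emptiesBeforeLast, trim_all_empty row h]

theorem foldl_agree (s : List (List (Int × Int))) : ∀ (a : Int),
    s.foldl (fun acc row => (row.foldl fInner (acc, 0)).1) a =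
    s.foldl (fun t row => t + emptiesBeforeLast row) a := by
  induction s with
  | nil => intro a; rfl
  | cons row rest ih =>
    intro a
    rw [List.foldl_cons, List.foldl_cons, row_contrib]
    exact ih _

-- ===== VERDICT (by name: the statement is the Claim_ definition above) =====
theorem f_spec : Claim_equal_f := by
  intro s _
  unfold Spec_f f f_alt
  exact foldl_agree s 0
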